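-- pv_equiv track=rewrite | github.com/oconsuel/CLAIM-Lab | backend/practices/trick_the_ai.py | _primary_term
-- ===== SOURCE A (Python) =====
-- def _primary_term(label_en):
--     raw = str(label_en or "")
--     parts = [p.strip() for p in raw.split(",") if p and p.strip()]
--     if parts:
--         parts_sorted = sorted(
--             parts,
--             key=lambda p: (len(p.split()), len(p)),
--             reverse=True,
--         )
--         term = parts_sorted[0]
--     else:
--         term = raw.strip()
--     term = term.replace("_", " ")
--     term = term.replace("bullterrier", "bull terrier")
--     term = term.replace("bullmastiff", "bull mastiff")
--     return " ".join(term.split())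
-- ===== SOURCE B (Python) =====
-- def _primary_term(label_en):
--     raw = str(label_en or "")
--     best = None
--     best_key = None
--     for piece in raw.split(","):
--         p = piece.strip()
--         if not p:
--             continue
--         key = (len(p.split()), len(p))
--         if best is None or key > best_key:
--             best, best_key = p, key
--     term = best if best is not None else raw.strip()
--     term = term.replace("_", " ")
--     term = term.replace("bullterrier", "bull terrier")
--     term = term.replace("bullmastiff", "bull mastiff")
--     return " ".join(term.split())
-- ===== Notes on version B (the rewrite author's own statement) =====
-- stated objective: simpler
-- what changed: Replaces the build-list-then-stable-reverse-sort-and-take-[0] selection with a single linear scan that keeps the first part whose (word count, length) key is strictly maximal.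
import Mathlib
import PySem

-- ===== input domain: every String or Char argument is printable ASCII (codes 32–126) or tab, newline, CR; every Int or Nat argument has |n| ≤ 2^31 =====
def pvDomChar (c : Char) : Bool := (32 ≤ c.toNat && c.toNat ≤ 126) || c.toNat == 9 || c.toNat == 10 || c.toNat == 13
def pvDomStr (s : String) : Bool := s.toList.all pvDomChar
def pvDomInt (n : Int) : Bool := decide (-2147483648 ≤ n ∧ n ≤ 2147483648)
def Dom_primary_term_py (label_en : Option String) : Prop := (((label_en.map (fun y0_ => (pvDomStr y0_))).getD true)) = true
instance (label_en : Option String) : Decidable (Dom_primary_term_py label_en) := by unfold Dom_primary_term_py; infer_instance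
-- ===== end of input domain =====

-- B replaces A's build-list/stable-reverse-sort/take-first selection with one linear scan keeping the
-- first part whose (word count, length) key is strictly maximal; same normalization and result.

-- ==== PORT A =====
def primary_term_py (label_en : Option String) : String :=
  let raw := label_en.getD ""
  let parts := (((PySem.Str.split? raw ",").getD []).filter
      (fun p => !(p == "") && !(PySem.Str.strip p == ""))).map PySem.Str.strip
  let term :=
    if parts ≠ [] then
      (PySem.List.sorted2 parts (fun p => (PySem.Str.split₀ p).length)
        (fun p => PySem.Str.len p) true).headD ""
    else PySem.Str.strip raw
  let term := PySem.Str.replace term "_" " "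
  let term := PySem.Str.replace term "bullterrier" "bull terrier"
  let term := PySem.Str.replace term "bullmastiff" "bull mastiff"
  PySem.Str.join " " (PySem.Str.split₀ term)

-- ===== PORT B =====
def primary_term_py_alt (label_en : Option String) : String :=
  let raw := label_en.getD ""
  let best := ((PySem.Str.split? raw ",").getD []).foldl
    (fun best piece =>
      let p := PySem.Str.strip piece
      if p == "" then best
      else
        let k1 := (PySem.Str.split₀ p).length
        let k2 := PySem.Str.len p
        match best with
        | none => some (p, k1, k2)
        | some (q, b1, b2) =>
          if b1 < k1 || (b1 == k1 && decide (b2 < k2)) then some (p, k1, k2)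
          else some (q, b1, b2))
    none
  let term :=
    match best with
    | some (p, _, _) => p
    | none => PySem.Str.strip raw
  let term := PySem.Str.replace term "_" " "
  let term := PySem.Str.replace term "bullterrier" "bull terrier"
  let term := PySem.Str.replace term "bullmastiff" "bull mastiff"
  PySem.Str.join " " (PySem.Str.split₀ term)

-- ===== PRECONDITION & SPEC =====
def Spec_primary_term_py (label_en : Option String) (out : String) : Prop := out = primary_term_py_alt label_en
instance (label_en : Option String) (out : String) : Decidable (Spec_primary_term_py label_en out) := by unfold Spec_primary_term_py; infer_instance

-- ===== CLAIM (what is proved, stated in full; the proofs are below) =====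
def Claim_equal_primary_term_py : Prop := ∀ (label_en : Option String), Dom_primary_term_py label_en → Spec_primary_term_py label_en (primary_term_py label_en)

-- ===== LEMMAS AND PROOFS =====

-- the strict lexicographic "key q < key p" test on the (word count, length) key
def pvLt (q p : String) : Bool :=
  decide ((PySem.Str.split₀ q).length < (PySem.Str.split₀ p).length) ||
  (!decide ((PySem.Str.split₀ p).length < (PySem.Str.split₀ q).length) &&
   decide (PySem.Str.len q < PySem.Str.len p))

-- running "first strict maximum" scan (what the head of A's stable reverse sort computes)
def pvScan (l : List String) (m : Option String) : Option String :=
  l.foldl (fun m x => some (match m with | none => x | some h => if pvLt h x then x else h)) m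

-- B's accumulator caches the key components alongside the best part
def pvEncode (m : Option String) : Option (String × Nat × Int) :=
  m.map (fun p => (p, (PySem.Str.split₀ p).length, PySem.Str.len p))

theorem pvHead?_insertBy (before : String → String → Bool) (x : String) (acc : List String) :
    (PySem.List.insertBy before x acc).head? =
      some (match acc.head? with | none => x | some h => if before x h then x else h) := by
  cases acc with
  | nil => rfl
  | cons h t => simp only [PySem.List.insertBy, List.head?_cons]; split <;> simp

theorem pvHead?_foldl_insertBy (before : String → String → Bool) (l : List String) (acc : List String) :
    (l.foldl (fun a x => PySem.List.insertBy before x a) acc).head? =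
      l.foldl (fun m x => some (match m with | none => x | some h => if before x h then x else h))
        acc.head? := by
  induction l generalizing acc with
  | nil => rfl
  | cons y ys ih => simp only [List.foldl_cons, ih, pvHead?_insertBy]

theorem pvSorted2_head? (parts : List String) :
    (PySem.List.sorted2 parts (fun p => (PySem.Str.split₀ p).length)
        (fun p => PySem.Str.len p) true).head? = pvScan parts none := by
  have h := pvHead?_foldl_insertBy (fun a b => pvLt b a) parts []
  simpa [PySem.List.sorted2, pvScan, pvLt] using h

theorem pvScan_cons (x : String) (l : List String) (m : Option String) :
    pvScan (x :: l) m =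
      pvScan l (some (match m with | none => x | some h => if pvLt h x then x else h)) := rfl

theorem pvScan_some (l : List String) (q : String) : ∃ r, pvScan l (some q) = some r := by
  induction l generalizing q with
  | nil => exact ⟨q, rfl⟩
  | cons y ys ih => rw [pvScan_cons]; exact ih _

theorem pvCond_eq (a b : Nat) (c d : Int) :
    ((decide (a < b)) || (a == b && decide (c < d))) =
      (decide (a < b) || (!decide (b < a) && decide (c < d))) := by
  by_cases h1 : a < b <;> by_cases h2 : b < a <;> by_cases h3 : a = b <;> simp_all <;> omega

theorem pvStrip_empty_of_empty (p : String) (h : p = "") : PySem.Str.strip p = "" := by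
  subst h; decide

theorem pvBfold_encode (pieces : List String) (m : Option String) :
    pieces.foldl
      (fun best piece =>
        let p := PySem.Str.strip piece
        if p == "" then best
        else
          let k1 := (PySem.Str.split₀ p).length
          let k2 := PySem.Str.len p
          match best with
          | none => some (p, k1, k2)
          | some (q, b1, b2) =>
            if b1 < k1 || (b1 == k1 && decide (b2 < k2)) then some (p, k1, k2)
            else some (q, b1, b2))
      (pvEncode m) =
    pvEncode (pvScan ((pieces.filter
        (fun p => !(p == "") && !(PySem.Str.strip p == ""))).map PySem.Str.strip) m) := by
  induction pieces generalizing m with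
  | nil => rfl
  | cons piece rest ih =>
      simp only [List.foldl_cons, List.filter_cons]
      by_cases hp : PySem.Str.strip piece = ""
      · rw [if_pos (by simp [hp]), if_neg (by simp [hp])]
        exact ih m
      · have hne : piece ≠ "" := fun h => hp (pvStrip_empty_of_empty piece h)
        rw [if_neg (by simp [hp]), if_pos (by simp [hp, hne]), List.map_cons, pvScan_cons]
        cases m with
        | none => exact ih (some (PySem.Str.strip piece))
        | some q =>
            simp only [pvEncode, Option.map_some]
            have hcond :
                (decide ((PySem.Str.split₀ q).length <
                    (PySem.Str.split₀ (PySem.Str.strip piece)).length) ||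
                  ((PySem.Str.split₀ q).length ==
                      (PySem.Str.split₀ (PySem.Str.strip piece)).length &&
                    decide (PySem.Str.len q < PySem.Str.len (PySem.Str.strip piece)))) =
                  pvLt q (PySem.Str.strip piece) := by
              rw [pvCond_eq]; rfl
            rw [hcond]
            by_cases hlt : pvLt q (PySem.Str.strip piece) = true
            · rw [if_pos hlt, if_pos hlt]
              exact ih (some (PySem.Str.strip piece))
            · rw [if_neg hlt, if_neg hlt]
              exact ih (some q)

-- ===== VERDICT (by name: the statement is the Claim_ definition above) =====
theorem primary_term_py_spec : Claim_equal_primary_term_py := by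
  intro label_en _
  simp only [Spec_primary_term_py, primary_term_py, primary_term_py_alt]
  generalize (PySem.Str.split? (label_en.getD "") ",").getD [] = pieces
  have hb := pvBfold_encode pieces none
  simp only [pvEncode, Option.map_none] at hb
  rw [hb]
  cases hp : (pieces.filter
      (fun p => !(p == "") && !(PySem.Str.strip p == ""))).map PySem.Str.strip with
  | nil => simp [pvScan]
  | cons p rest =>
      rw [pvScan_cons]
      obtain ⟨r, hr⟩ := pvScan_some rest p
      rw [hr]
      have hhead := pvSorted2_head? (p :: rest)
      rw [pvScan_cons, hr] at hhead
      rw [if_pos (by simp), List.headD_eq_head?_getD, hhead]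
      simp
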